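-- pv_equiv track=rewrite | github.com/ansible/ansible-risk-insight | scripts/gen_ram_slim.py | sort_with_priority
-- ===== SOURCE A (Python) =====
-- def sort_with_priority(findings_json_list, priority_list):
--     if not priority_list:
--         return findings_json_list
--
--     sorted_list = []
--     for pname in priority_list:
--         found = False
--         for fpath in findings_json_list:
--             query = "/" + pname + "/"
--             if query in fpath:
--                 sorted_list.append(fpath)
--                 found = True
--             if found:
--                 break
--
--     for fpath in findings_json_list:
--         if fpath in sorted_list:
--             continue
--         sorted_list.append(fpath)
--     return sorted_list
-- ===== SOURCE B (Python) =====
-- def sort_with_priority(findings_json_list, priority_list):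
--     if not priority_list:
--         return findings_json_list
--
--     # One pass over findings: record, for each priority name, the first
--     # finding whose path contains "/<name>/".  A finding without any "/"
--     # cannot contain a "/<name>/" query, so it is skipped outright.
--     first_match = {}
--     for fpath in findings_json_list:
--         if "/" not in fpath:
--             continue
--         for pname in priority_list:
--             if pname not in first_match and "/" + pname + "/" in fpath:
--                 first_match[pname] = fpath
--
--     head = [first_match[p] for p in priority_list if p in first_match]
--
--     # Append the remaining findings, deduplicating with a set (A's second
--     # loop rescans the growing output list for every finding).
--     seen = set(head)
--     result = list(head)
--     for fpath in findings_json_list: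
--         if fpath not in seen:
--             seen.add(fpath)
--             result.append(fpath)
--     return result
-- ===== Notes on version B (the rewrite author's own statement) =====
-- stated objective: faster
-- what changed: B inverts the priority search into a single pass over the findings that fills a dict of first matches per priority name, skips findings containing no '/' (they cannot match any '/name/' query), and deduplicates the tail with a set instead of rescanning the growing output list for every finding.
import Mathlib
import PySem

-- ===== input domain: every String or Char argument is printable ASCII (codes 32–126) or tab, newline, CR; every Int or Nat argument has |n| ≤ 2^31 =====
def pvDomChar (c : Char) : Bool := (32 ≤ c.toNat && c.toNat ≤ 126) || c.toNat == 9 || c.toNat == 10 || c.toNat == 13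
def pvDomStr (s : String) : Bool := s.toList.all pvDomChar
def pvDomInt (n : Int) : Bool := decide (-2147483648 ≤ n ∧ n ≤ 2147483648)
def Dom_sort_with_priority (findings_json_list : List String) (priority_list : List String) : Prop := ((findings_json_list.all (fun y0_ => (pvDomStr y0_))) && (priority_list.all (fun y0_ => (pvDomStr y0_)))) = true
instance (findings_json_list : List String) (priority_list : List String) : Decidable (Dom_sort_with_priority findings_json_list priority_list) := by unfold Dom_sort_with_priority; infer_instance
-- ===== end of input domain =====

-- B builds the priority head in one pass over the findings with a dict (skipping
-- findings that contain no '/' at all, which cannot match any "/name/" query) and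
-- deduplicates the tail with a set instead of rescanning the growing output list.

-- '"/" + pname + "/" in fpath' (exact: PySem.Chars.isIn is Python's substring 'in')
def pvQueryIn (pname fpath : String) : Bool :=
  PySem.Chars.isIn ('/' :: (pname.toList ++ ['/'])) fpath.toList

-- ===== PORT A =====
-- A's inner loop: scan findings, append a match, 'if found: break'
def pvAScan (pname : String) : List String → List String → List String
  | [], acc => acc
  | f :: rest, acc =>
    let hit := pvQueryIn pname f
    let acc' := if hit then acc ++ [f] else acc
    if hit then acc' else pvAScan pname rest acc'

def sort_with_priority (findings_json_list : List String) (priority_list : List String) : List String :=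
  if priority_list = [] then findings_json_list
  else
    let sorted1 := priority_list.foldl
      (fun acc pname => pvAScan pname findings_json_list acc) []
    findings_json_list.foldl
      (fun acc fpath => if acc.contains fpath then acc else acc ++ [fpath]) sorted1

-- ===== PORT B =====
-- B's double loop building first_match : dict pname → first matching fpath
def pvBDict (findings_json_list : List String) (priority_list : List String) : PySem.Dict String String :=
  findings_json_list.foldl
    (fun d fpath =>
      if PySem.Chars.isIn ['/'] fpath.toList then
        priority_list.foldl
          (fun d pname =>
            if d.contains pname then d
            else if pvQueryIn pname fpath then d.insert pname fpath else d) d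
      else d)
    PySem.Dict.empty

def sort_with_priority_alt (findings_json_list : List String) (priority_list : List String) : List String :=
  if priority_list = [] then findings_json_list
  else
    let first_match := pvBDict findings_json_list priority_list
    let head := priority_list.filterMap (fun pname => first_match.get? pname)
    let fin := findings_json_list.foldl
      (fun (rs : List String × PySem.Set String) fpath =>
        if rs.2.contains fpath then rs else (rs.1 ++ [fpath], rs.2.add fpath))
      (head, PySem.Set.ofList head)
    fin.1

-- ===== PRECONDITION & SPEC =====
def Spec_sort_with_priority (findings_json_list : List String) (priority_list : List String) (out : List String) : Prop := out = sort_with_priority_alt findings_json_list priority_list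
instance (findings_json_list : List String) (priority_list : List String) (out : List String) : Decidable (Spec_sort_with_priority findings_json_list priority_list out) := by unfold Spec_sort_with_priority; infer_instance

-- ===== CLAIM (what is proved, stated in full; the proofs are below) =====
def Claim_equal_sort_with_priority : Prop := ∀ (findings_json_list : List String) (priority_list : List String), Dom_sort_with_priority findings_json_list priority_list → Spec_sort_with_priority findings_json_list priority_list (sort_with_priority findings_json_list priority_list)

-- ===== LEMMAS AND PROOFS =====

-- the first finding whose path contains "/pname/"
def pvFirstMatch (pname : String) (xs : List String) : Option String :=
  xs.find? (fun f => pvQueryIn pname f)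

lemma pvAScan_eq (pname : String) (xs : List String) :
    ∀ acc, pvAScan pname xs acc = acc ++ (pvFirstMatch pname xs).toList := by
  induction xs with
  | nil => intro acc; simp [pvAScan, pvFirstMatch]
  | cons f rest ih =>
    intro acc
    by_cases h : pvQueryIn pname f
    · simp [pvAScan, pvFirstMatch, h]
    · simp [pvAScan, pvFirstMatch, h, ih]

lemma pvAHead_eq (F : List String) (P : List String) :
    ∀ acc, P.foldl (fun acc pname => pvAScan pname F acc) acc
      = acc ++ P.filterMap (fun p => pvFirstMatch p F) := by
  induction P with
  | nil => intro acc; simp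
  | cons p rest ih =>
    intro acc
    simp only [List.foldl_cons, List.filterMap_cons]
    rw [pvAScan_eq, ih]
    cases pvFirstMatch p F <;> simp

lemma pvBInner_get? (f : String) (P : List String) :
    ∀ (d : PySem.Dict String String) (p : String),
      (P.foldl (fun d pname =>
        if d.contains pname then d
        else if pvQueryIn pname f then d.insert pname f else d) d).get? p
      = if p ∈ P then (d.get? p).or (if pvQueryIn p f then some f else none)
        else d.get? p := by
  induction P with
  | nil => intro d p; simp
  | cons p' rest ih =>
    intro d p
    simp only [List.foldl_cons]
    rw [ih]
    by_cases hp : p = p'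
    · subst hp
      by_cases hc : d.contains p
      · cases hg : d.get? p with
        | none =>
          exact absurd ((PySem.Dict.get?_eq_none_iff_contains d p).mp hg) (by simp [hc])
        | some v => simp [hc, hg]
      · have hg : d.get? p = none := by
          rw [PySem.Dict.get?_eq_none_iff_contains]; simp [hc]
        by_cases hq : pvQueryIn p f
        · simp [hc, hq, hg, PySem.Dict.get?_insert_self]
        · simp [hc, hq, hg]
    · have hstep : (if d.contains p' then d
          else if pvQueryIn p' f then d.insert p' f else d).get? p = d.get? p := by
        split
        · rfl
        · split
          · exact PySem.Dict.get?_insert_of_ne d f hp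
          · rfl
      rw [hstep]
      simp [hp]

-- a path that matches "/pname/" contains a '/'
lemma pvQueryIn_slash {p f : String} (h : pvQueryIn p f = true) :
    PySem.Chars.isIn ['/'] f.toList = true := by
  unfold pvQueryIn at h
  rw [PySem.Chars.isIn_iff_infix] at h ⊢
  exact List.IsInfix.trans (List.infix_cons_iff.mpr (Or.inl ⟨_, rfl⟩)) h

lemma pvBDict_get? (F : List String) (P : List String) :
    ∀ (d : PySem.Dict String String) (p : String), p ∈ P →
      (F.foldl (fun d fpath =>
        if PySem.Chars.isIn ['/'] fpath.toList then
          P.foldl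
            (fun d pname =>
              if d.contains pname then d
              else if pvQueryIn pname fpath then d.insert pname fpath else d) d
        else d) d).get? p
      = (d.get? p).or (pvFirstMatch p F) := by
  induction F with
  | nil => intro d p _; simp [pvFirstMatch]
  | cons f rest ih =>
    intro d p hp
    simp only [List.foldl_cons]
    by_cases hs : PySem.Chars.isIn ['/'] f.toList
    · rw [if_pos hs, ih _ _ hp, pvBInner_get? f P _ p]
      simp only [hp, if_true]
      unfold pvFirstMatch
      rw [List.find?_cons]
      by_cases hq : pvQueryIn p f
      · cases d.get? p <;> simp [hq]
      · cases d.get? p <;> simp [hq]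
    · have hq : pvQueryIn p f = false := by
        cases hq : pvQueryIn p f
        · rfl
        · exact absurd (pvQueryIn_slash hq) hs
      rw [if_neg hs, ih _ _ hp]
      unfold pvFirstMatch
      rw [List.find?_cons, hq]

lemma pvHead_eq (F : List String) (P : List String) :
    P.filterMap (fun pname => (pvBDict F P).get? pname)
      = P.filterMap (fun p => pvFirstMatch p F) := by
  apply List.filterMap_congr
  intro p hp
  unfold pvBDict
  rw [pvBDict_get? F P PySem.Dict.empty p hp]
  simp [PySem.Dict.empty, PySem.Dict.get?]

lemma pvTail_eq (F : List String) :
    ∀ (acc : List String) (s : PySem.Set String),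
      (∀ x, s.contains x = acc.contains x) →
      (F.foldl
        (fun (rs : List String × PySem.Set String) fpath =>
          if rs.2.contains fpath then rs else (rs.1 ++ [fpath], rs.2.add fpath))
        (acc, s)).1
      = F.foldl (fun acc fpath => if acc.contains fpath then acc else acc ++ [fpath]) acc := by
  induction F with
  | nil => intro acc s _; simp
  | cons f rest ih =>
    intro acc s hinv
    simp only [List.foldl_cons, hinv f]
    by_cases hc : acc.contains f
    · simp only [hc, if_true]
      exact ih acc s hinv
    · simp only [hc]
      apply ih
      have hm : ∀ y, y ∈ s ↔ y ∈ acc := by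
        intro y
        have h := hinv y
        rw [Bool.eq_iff_iff] at h
        simpa [PySem.Set.contains_iff] using h
      intro x
      rw [Bool.eq_iff_iff]
      simp [PySem.Set.mem_add, hm x, or_comm]

-- ===== VERDICT (by name: the statement is the Claim_ definition above) =====
theorem sort_with_priority_spec : Claim_equal_sort_with_priority := by
  intro F P _
  unfold Spec_sort_with_priority sort_with_priority sort_with_priority_alt
  by_cases hP : P = []
  · simp [hP]
  · simp only [hP, if_false]
    rw [pvAHead_eq, pvHead_eq]
    rw [pvTail_eq]
    · simp
    · intro x
      rw [Bool.eq_iff_iff]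
      simp [PySem.Set.mem_ofList]
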